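-- pv_equiv track=rewrite | github.com/YaBoiTRich/yaboitrich.github.io | process_puzzles.py | get_puzzle_sets_by_type
-- ===== SOURCE A (Python) =====
-- def get_puzzle_sets_by_type(data):
--     type_field = 3
--     name_field = 0
--     designer_field = 2
--     producer_field = 1
--
--     types = [row[type_field] for row in data]
--     types = sorted(set(types))
--
--     type_sets = {typed: [] for typed in types}
--
--     for row in data:
--         type_sets[row[type_field]].append(
--             f"{row[name_field]} by {row[designer_field]} (prod. {row[producer_field]})"
--         )
--
--     return type_sets
-- ===== SOURCE B (Python) =====
-- def get_puzzle_sets_by_type(data):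
--     # Sort-then-scan: stable-sort the formatted (type, entry) pairs by type,
--     # then cut the sorted list into runs of equal type; no dict grouping at all.
--     pairs = sorted(
--         ((row[3], f"{row[0]} by {row[2]} (prod. {row[1]})") for row in data),
--         key=lambda p: p[0],
--     )
--     result = {}
--     i = 0
--     n = len(pairs)
--     while i < n:
--         t = pairs[i][0]
--         j = i
--         vals = []
--         while j < n and pairs[j][0] == t:
--             vals.append(pairs[j][1])
--             j += 1
--         result[t] = vals
--         i = j
--     return result
-- ===== Notes on version B (the rewrite author's own statement) =====
-- stated objective: alternative
-- what changed: Replaces A's dict-based grouping (collect types, sort them, preallocate empty lists, then fill by key lookup) with sort-then-scan: stable-sort the formatted (type, entry) pairs by type and cut the sorted list into consecutive runs of equal type, so no per-row dict lookup or preallocation happens at all; stability preserves A's within-type order and the scan emits keys in sorted order.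
import Mathlib
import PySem

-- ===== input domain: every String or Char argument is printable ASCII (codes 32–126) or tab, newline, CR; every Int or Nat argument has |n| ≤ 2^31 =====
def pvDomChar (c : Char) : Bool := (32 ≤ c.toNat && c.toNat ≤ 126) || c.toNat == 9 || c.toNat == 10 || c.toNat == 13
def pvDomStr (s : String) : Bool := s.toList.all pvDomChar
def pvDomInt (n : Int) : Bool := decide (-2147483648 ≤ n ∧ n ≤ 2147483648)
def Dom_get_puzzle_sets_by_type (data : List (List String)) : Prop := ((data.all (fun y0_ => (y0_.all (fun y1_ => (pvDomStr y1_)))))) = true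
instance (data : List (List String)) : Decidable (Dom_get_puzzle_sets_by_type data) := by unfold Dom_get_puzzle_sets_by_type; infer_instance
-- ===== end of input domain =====

-- B replaces A's dict-based grouping (collect types, sort, preallocate, fill by key lookup)
-- with sort-then-scan: stable-sort the (type, entry) pairs by type and cut the sorted list
-- into runs of equal type (objective: alternative).

-- ===== PORT A =====
-- row[3] (IndexError = none; Pre_ excludes the none case, the .getD "" is never reached there)
def pvKey (row : List String) : String := (PySem.List.pyGet? row 3).getD ""

-- the f-string f"{row[0]} by {row[2]} (prod. {row[1]})" (identical in A and B)
def pvFmt (row : List String) : String :=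
  (PySem.List.pyGet? row 0).getD "" ++ " by " ++ (PySem.List.pyGet? row 2).getD ""
    ++ " (prod. " ++ (PySem.List.pyGet? row 1).getD "" ++ ")"

def get_puzzle_sets_by_type (data : List (List String)) : List (String × List String) :=
  let types := data.map (fun row => pvKey row)
  let types := PySem.List.sorted (PySem.Set.ofList types) (fun x => x) false
  let type_sets : PySem.Dict String (List String) :=
    types.foldl (fun d t => d.insert t []) PySem.Dict.empty
  let type_sets :=
    data.foldl (fun d row => d.modify (pvKey row) [] (fun l => l ++ [pvFmt row])) type_sets
  type_sets.items

-- ===== PORT B =====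
-- the inner while loop of Source B: collect the run of pairs sharing the current type, then
-- continue after the run (takeWhile/dropWhile are exactly 'while j < n and pairs[j][0] == t')
def pvChunk : List (String × String) → List (String × List String)
  | [] => []
  | (t, v) :: rest =>
      (t, v :: (rest.takeWhile (fun p => p.1 == t)).map Prod.snd)
        :: pvChunk (rest.dropWhile (fun p => p.1 == t))
termination_by l => l.length
decreasing_by
  simp only [List.length_cons]
  exact Nat.lt_succ_of_le (List.length_dropWhile_le _ _)

def get_puzzle_sets_by_type_alt (data : List (List String)) : List (String × List String) :=
  let pairs := PySem.List.sorted (data.map (fun row => (pvKey row, pvFmt row)))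
      (fun p => p.1) false
  pvChunk pairs

-- ===== PRECONDITION & SPEC =====
-- Pre_ excludes exactly the inputs where the Python A raises IndexError: a row shorter than 4.
def Pre_get_puzzle_sets_by_type (data : List (List String)) : Prop :=
  ∀ row ∈ data, 4 ≤ row.length
instance (data : List (List String)) : Decidable (Pre_get_puzzle_sets_by_type data) := by
  unfold Pre_get_puzzle_sets_by_type; infer_instance

def pvWitness_get_puzzle_sets_by_type : List (List String) :=
  [["cube", "Acme", "Ann", "twist"], ["ring", "Brio", "Bob", "wire"]]

def Spec_get_puzzle_sets_by_type (data : List (List String)) (out : List (String × List String)) : Prop := out = get_puzzle_sets_by_type_alt data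
instance (data : List (List String)) (out : List (String × List String)) : Decidable (Spec_get_puzzle_sets_by_type data out) := by unfold Spec_get_puzzle_sets_by_type; infer_instance

-- ===== CLAIM (what is proved, stated in full; the proofs are below) =====
def Claim_equal_get_puzzle_sets_by_type : Prop := ∀ (data : List (List String)), Dom_get_puzzle_sets_by_type data → Pre_get_puzzle_sets_by_type data → Spec_get_puzzle_sets_by_type data (get_puzzle_sets_by_type data)

-- ===== LEMMAS AND PROOFS =====

-- the lookup after A's fill loop: all formatted rows with key t, in order
theorem pv_getD_fill (data : List (List String)) (d : PySem.Dict String (List String))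
    (t : String) :
    (data.foldl (fun d row => d.modify (pvKey row) [] (fun l => l ++ [pvFmt row])) d).getD t []
      = d.getD t [] ++ (data.filter (fun row => pvKey row == t)).map pvFmt := by
  have h : data.foldl (fun d row => d.modify (pvKey row) [] (fun l => l ++ [pvFmt row])) d
      = (data.map (fun r => (pvKey r, pvFmt r))).foldl
          (fun d p => d.modify p.1 [] (fun l => l ++ [p.2])) d := by
    rw [List.foldl_map]
  rw [h, PySem.Dict.getD_foldl_modify_append]
  simp [List.filter_map, List.map_map, Function.comp_def]

-- a dict preloaded with empty lists looks up to [] everywhere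
theorem pv_getD_init (L : List String) (d : PySem.Dict String (List String)) (t : String)
    (h : d.getD t [] = []) :
    (L.foldl (fun d t' => d.insert t' []) d).getD t [] = [] := by
  induction L generalizing d with
  | nil => simpa using h
  | cons x xs ih =>
      simp only [List.foldl_cons]
      exact ih _ (by rw [PySem.Dict.getD_insert]; split <;> simp [h])

-- updating a set with elements it already has changes nothing
theorem pv_set_update_of_subset (s : PySem.Set String) (xs : List String)
    (h : ∀ x ∈ xs, x ∈ s) : PySem.Set.update s xs = s := by
  induction xs generalizing s with
  | nil => rfl
  | cons x xs ih =>
      have hx : PySem.Set.add s x = s := by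
        simp [PySem.Set.add, PySem.Set.contains, h x (by simp)]
      show PySem.Set.update (PySem.Set.add s x) xs = s
      rw [hx]; exact ih s (fun y hy => h y (by simp [hy]))

-- A characterised: the sorted distinct types, each with its formatted rows in input order
theorem pv_A_char (data : List (List String)) :
    get_puzzle_sets_by_type data
      = (PySem.List.sorted (PySem.Set.ofList (data.map pvKey)) (fun x => x) false).map
          (fun t => (t, (data.filter (fun row => pvKey row == t)).map pvFmt)) := by
  unfold get_puzzle_sets_by_type
  simp only []
  set types := data.map (fun row => pvKey row) with htypes
  set S := PySem.Set.ofList types with hS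
  set sortedT := PySem.List.sorted S (fun x => x) false with hsorted
  have hSnodup : S.Nodup := PySem.Set.nodup_ofList types
  have hTnodup : sortedT.Nodup := ((PySem.List.sorted_perm S (fun x => x) false).nodup_iff).mpr hSnodup
  have hmemT : ∀ x, x ∈ sortedT ↔ x ∈ S := fun x =>
    (PySem.List.sorted_perm S (fun x => x) false).mem_iff
  set init := sortedT.foldl (fun d t => d.insert t ([] : List String)) PySem.Dict.empty with hinit
  have hinit_items : init.items = sortedT.map (fun t => (t, ([] : List String))) := by
    rw [hinit]
    have := PySem.Dict.items_foldl_insert_fresh sortedT (fun t => t)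
      (fun _ => ([] : List String)) PySem.Dict.empty
      (fun a _ => PySem.Dict.contains_empty a) (by simpa using hTnodup)
    simpa using this
  have hinit_keys : init.keys = sortedT := by
    simp [PySem.Dict.keys, hinit_items, List.map_map, Function.comp_def]
  set Adict := data.foldl (fun d row => d.modify (pvKey row) [] (fun l => l ++ [pvFmt row])) init
    with hAdict
  have hAkeys : Adict.keys = sortedT := by
    rw [hAdict, PySem.Dict.keys_foldl_modify_key data pvKey []
          (fun _ row => (fun l => l ++ [pvFmt row])) init, hinit_keys]
    apply pv_set_update_of_subset
    intro x hx
    rw [hmemT]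
    exact (PySem.Set.mem_ofList types x).mpr (by simpa [htypes] using hx)
  have hAnodup : Adict.keys.Nodup := hAkeys ▸ hTnodup
  rw [PySem.Dict.items_eq_map_keys Adict hAnodup ([] : List String), hAkeys]
  apply List.map_congr_left
  intro t _
  have hA : Adict.getD t [] = (data.filter (fun row => pvKey row == t)).map pvFmt := by
    rw [hAdict, pv_getD_fill, pv_getD_init sortedT PySem.Dict.empty t (by simp)]
    simp
  rw [hA]

-- STABILITY of the sort: inserting x into a key-sorted ys puts it after every equal key
theorem pv_filter_insertBy (t : String) (x : String × String) (ys : List (String × String))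
    (h : ys.Pairwise (fun a b => a.1 ≤ b.1)) :
    (PySem.List.insertBy (fun a b => decide (a.1 < b.1)) x ys).filter (fun y => y.1 == t)
      = ys.filter (fun y => y.1 == t) ++ (if x.1 == t then [x] else []) := by
  induction ys with
  | nil =>
      show List.filter (fun y => y.1 == t) [x] = _
      rw [List.filter_cons]
      by_cases hxt : x.1 = t
      · rw [if_pos (by simp [hxt]), if_pos (by simp [hxt])]; rfl
      · rw [if_neg (by simp [hxt]), if_neg (by simp [hxt])]; rfl
  | cons y ys ih =>
      rw [List.pairwise_cons] at h
      have hstep : PySem.List.insertBy (fun a b : String × String => decide (a.1 < b.1)) x (y :: ys)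
          = if decide (x.1 < y.1) = true then x :: y :: ys
            else y :: PySem.List.insertBy (fun a b => decide (a.1 < b.1)) x ys := rfl
      rw [hstep]
      by_cases hlt : x.1 < y.1
      · rw [if_pos (by simpa using hlt)]
        by_cases hxt : x.1 = t
        · have hempty : (y :: ys).filter (fun y => y.1 == t) = [] := by
            rw [List.filter_eq_nil_iff]
            intro p hp
            have hyp : y.1 ≤ p.1 := by
              rcases List.mem_cons.mp hp with hp1 | hp2
              · exact hp1 ▸ le_refl _
              · exact h.1 p hp2
            simp only [beq_iff_eq]
            intro hpt
            rw [hpt, ← hxt] at hyp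
            exact absurd (lt_of_lt_of_le hlt hyp) (lt_irrefl _)
          rw [List.filter_cons_of_pos (by simp [hxt]), hempty, if_pos (by simp [hxt])]
          rfl
        · rw [List.filter_cons_of_neg (by simp [hxt]), if_neg (by simp [hxt]), List.append_nil]
      · rw [if_neg (by simpa using hlt), List.filter_cons, List.filter_cons, ih h.2]
        by_cases hyt : (y.1 == t) = true
        · rw [if_pos hyt, if_pos hyt]; simp
        · rw [if_neg hyt, if_neg hyt]

theorem pv_filter_sorted (pairs : List (String × String)) (t : String) :
    (PySem.List.sorted pairs (fun p => p.1) false).filter (fun y => y.1 == t)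
      = pairs.filter (fun y => y.1 == t) := by
  induction pairs using List.reverseRecOn with
  | nil => rfl
  | append_singleton xs x ih =>
      rw [PySem.List.sorted_eq_foldl_insertBy, List.foldl_append, List.foldl_cons, List.foldl_nil,
          ← PySem.List.sorted_eq_foldl_insertBy,
          pv_filter_insertBy t x _ (PySem.List.sorted_pairwise xs (fun p => p.1)), ih,
          List.filter_append, List.filter_cons]
      simp

-- the scan over a key-sorted list produces one entry per distinct key, in key order
theorem pv_chunk_spec (K : List String) (L : List (String × String))
    (hK : K.Pairwise (· < ·)) (hL : L.Pairwise (fun a b => a.1 ≤ b.1))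
    (hmem : ∀ t, t ∈ K ↔ t ∈ L.map Prod.fst) :
    pvChunk L = K.map (fun t => (t, (L.filter (fun y => y.1 == t)).map Prod.snd)) := by
  induction K generalizing L with
  | nil =>
      cases L with
      | nil => rw [pvChunk]; rfl
      | cons p L' =>
          exact absurd ((hmem p.1).mpr (List.mem_map.mpr ⟨p, List.mem_cons_self, rfl⟩))
            (List.not_mem_nil)
  | cons t K' ih =>
      cases L with
      | nil => exact absurd ((hmem t).mp List.mem_cons_self) (by simp)
      | cons p rest =>
          obtain ⟨k, v⟩ := p
          rw [List.pairwise_cons] at hK hL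
          have hkK : k ∈ t :: K' := (hmem k).mpr (List.mem_map.mpr ⟨(k, v), List.mem_cons_self, rfl⟩)
          have htL : ∃ q ∈ (k, v) :: rest, q.1 = t := by
            rcases List.mem_map.mp ((hmem t).mp List.mem_cons_self) with ⟨q, hq, hqt⟩
            exact ⟨q, hq, hqt⟩
          have hkt : k = t := by
            rcases List.mem_cons.mp hkK with h1 | h2
            · exact h1
            · exfalso
              have htk : t < k := hK.1 k h2
              rcases htL with ⟨q, hq, hqt⟩
              rcases List.mem_cons.mp hq with hq1 | hq2
              · rw [hq1] at hqt; exact absurd (hqt ▸ htk) (lt_irrefl t)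
              · have hle := hL.1 q hq2
                rw [hqt] at hle
                exact absurd (lt_of_lt_of_le htk hle) (lt_irrefl t)
          subst hkt
          have hTall : ∀ q ∈ rest.takeWhile (fun p => p.1 == k), q.1 = k := fun q hq => by
            simpa using List.mem_takeWhile_imp hq
          have hDgt : ∀ q ∈ rest.dropWhile (fun p => p.1 == k), k < q.1 := by
            cases hDc : rest.dropWhile (fun p => p.1 == k) with
            | nil => intro q hq; exact absurd hq List.not_mem_nil
            | cons d D' =>
                have hw : rest.dropWhile (fun p => p.1 == k) ≠ [] := by rw [hDc]; simp
                have hdf := List.head_dropWhile_not (fun p : String × String => p.1 == k) hw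
                have hhd : (rest.dropWhile (fun p => p.1 == k)).head hw = d := by
                  simp [hDc]
                rw [hhd] at hdf
                have hdne : d.1 ≠ k := by simpa using hdf
                have hdrest : d ∈ rest := (List.dropWhile_sublist _).subset (by rw [hDc]; simp)
                have hkd : k < d.1 := lt_of_le_of_ne (hL.1 d hdrest) (Ne.symm hdne)
                have hDpair : (d :: D').Pairwise (fun a b => a.1 ≤ b.1) := by
                  rw [← hDc]
                  exact List.Pairwise.sublist (List.dropWhile_sublist _) hL.2
                rw [List.pairwise_cons] at hDpair
                intro q hq
                rcases List.mem_cons.mp hq with hq1 | hq2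
                · exact hq1 ▸ hkd
                · exact lt_of_lt_of_le hkd (hDpair.1 q hq2)
          have hTD : rest.takeWhile (fun p => p.1 == k) ++ rest.dropWhile (fun p => p.1 == k) = rest :=
            List.takeWhile_append_dropWhile
          have hfilter_k : (((k, v) :: rest).filter (fun y => y.1 == k))
              = (k, v) :: rest.takeWhile (fun p => p.1 == k) := by
            rw [List.filter_cons_of_pos (by simp)]
            congr 1
            conv_lhs => rw [← hTD]
            rw [List.filter_append,
                List.filter_eq_self.mpr (fun q hq => by simp [hTall q hq]),
                List.filter_eq_nil_iff.mpr (fun q hq => by simpa using (hDgt q hq).ne'),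
                List.append_nil]
          have hrec : pvChunk (rest.dropWhile (fun p => p.1 == k))
              = K'.map (fun t' => (t', ((rest.dropWhile (fun p => p.1 == k)).filter
                  (fun y => y.1 == t')).map Prod.snd)) := by
            apply ih _ hK.2 (List.Pairwise.sublist (List.dropWhile_sublist _) hL.2)
            intro t'
            constructor
            · intro ht'
              have htlt : k < t' := hK.1 t' ht'
              rcases List.mem_map.mp ((hmem t').mp (List.mem_cons_of_mem _ ht')) with ⟨q, hq, hqt⟩
              rcases List.mem_cons.mp hq with hq1 | hq2
              · exfalso
                rw [hq1] at hqt
                exact absurd (hqt ▸ htlt) (lt_irrefl _)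
              · rw [← hTD] at hq2
                rcases List.mem_append.mp hq2 with hq3 | hq4
                · exfalso
                  rw [hTall q hq3] at hqt
                  exact absurd (hqt ▸ htlt) (lt_irrefl _)
                · exact List.mem_map.mpr ⟨q, hq4, hqt⟩
            · intro ht'
              rcases List.mem_map.mp ht' with ⟨q, hq, hqt⟩
              have hqrest : q ∈ rest := (List.dropWhile_sublist _).subset hq
              have hqK : q.1 ∈ k :: K' :=
                (hmem q.1).mpr (List.mem_map.mpr ⟨q, List.mem_cons_of_mem _ hqrest, rfl⟩)
              rcases List.mem_cons.mp hqK with hq1 | hq2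
              · exact absurd hq1 (hDgt q hq).ne'
              · exact hqt ▸ hq2
          rw [pvChunk, List.map_cons, hrec]
          congr 1
          · rw [hfilter_k, List.map_cons]
          · apply List.map_congr_left
            intro t' ht'
            have hkt' : k ≠ t' := (hK.1 t' ht').ne
            have hfr : List.filter (fun y => y.1 == t') rest
                = List.filter (fun y => y.1 == t') (rest.dropWhile (fun p => p.1 == k)) := by
              conv_lhs => rw [← hTD]
              rw [List.filter_append,
                  List.filter_eq_nil_iff.mpr
                    (fun q hq => by rw [hTall q hq]; simpa using hkt'),
                  List.nil_append]
            rw [List.filter_cons_of_neg (by simpa using hkt'), hfr]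

-- ===== VERDICT (by name: the statement is the Claim_ definition above) =====
theorem get_puzzle_sets_by_type_spec : Claim_equal_get_puzzle_sets_by_type := by
  intro data _ _
  unfold Spec_get_puzzle_sets_by_type get_puzzle_sets_by_type_alt
  simp only []
  rw [pv_A_char]
  set pairs := data.map (fun row => (pvKey row, pvFmt row)) with hpairs
  set L := PySem.List.sorted pairs (fun p => p.1) false with hL
  have hkeys : pairs.map Prod.fst = data.map pvKey := by
    simp [hpairs, List.map_map, Function.comp_def]
  rw [pv_chunk_spec (PySem.List.sorted (PySem.Set.ofList (data.map pvKey)) (fun x => x) false) L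
      (by rw [← hkeys]; exact PySem.List.sorted_ofList_pairwise_lt _)
      (PySem.List.sorted_pairwise pairs (fun p => p.1))
      (by
        intro t
        rw [(PySem.List.sorted_perm (PySem.Set.ofList (data.map pvKey)) (fun x => x) false).mem_iff,
            PySem.Set.mem_ofList, ← hkeys]
        constructor
        · intro ht
          rcases List.mem_map.mp ht with ⟨p, hp, hpt⟩
          exact List.mem_map.mpr ⟨p, (PySem.List.sorted_perm pairs (fun p => p.1) false).mem_iff.mpr hp, hpt⟩
        · intro ht
          rcases List.mem_map.mp ht with ⟨p, hp, hpt⟩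
          exact List.mem_map.mpr ⟨p, (PySem.List.sorted_perm pairs (fun p => p.1) false).mem_iff.mp hp, hpt⟩)]
  apply List.map_congr_left
  intro t _
  rw [hL, pv_filter_sorted]
  simp [hpairs, List.filter_map, List.map_map, Function.comp_def]
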